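-- pv_equiv track=rewrite | github.com/lorelupo/divide-and-rule | scripts/split_corpus_sentences.py | move_split_point
-- ===== SOURCE A (Python) =====
-- def is_splittable(curr_idx, src, min_length):
--     return not(curr_idx < min_length or curr_idx > len(src)-min_length)
--
-- def move_split_point(curr_idx, src, min_length, low_bound, up_bound):
--     if low_bound == up_bound:
--         return curr_idx
--
--     backup = curr_idx
--     if curr_idx < min_length:
--         assert curr_idx <= up_bound
--         while not is_splittable(curr_idx, src, min_length) and curr_idx <= up_bound:
--             curr_idx += 1
--         if curr_idx <= up_bound:
--             return curr_idx
--         else: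
--             return backup
--     elif curr_idx > len(src)-min_length:
--         assert curr_idx > low_bound
--         while not is_splittable(curr_idx, src, min_length) and curr_idx > low_bound:
--             curr_idx -= 1
--         if curr_idx > low_bound:
--             return curr_idx
--         else:
--             return backup
--
--     return backup
-- ===== SOURCE B (Python) =====
-- def move_split_point(curr_idx, src, min_length, low_bound, up_bound):
--     if low_bound == up_bound:
--         return curr_idx
--     n = len(src)
--     if min_length <= curr_idx <= n - min_length:
--         return curr_idx
--     if curr_idx < min_length:
--         # nearest splittable position upward is min_length itself
--         if 2 * min_length <= n and min_length <= up_bound: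
--             return min_length
--         return curr_idx
--     # curr_idx > n - min_length: nearest splittable position downward is n - min_length
--     if 2 * min_length <= n and n - min_length > low_bound:
--         return n - min_length
--     return curr_idx
-- ===== Notes on version B (the rewrite author's own statement) =====
-- stated objective: simpler
-- what changed: Replaces A's step-by-step while loops (incrementing/decrementing the index until it becomes splittable or leaves the bound) with a direct computation of the unique nearest splittable target (min_length or len(src)-min_length) plus a single bound check.
-- crash fix: When low_bound != up_bound and either curr_idx < min_length with curr_idx > up_bound, or curr_idx >= min_length with curr_idx > len(src)-min_length and curr_idx <= low_bound, A raises AssertionError; B returns curr_idx unchanged. — e.g. on move_split_point(0, [], 1, 0, -1): A raises AssertionError, B returns 0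
import Mathlib
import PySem

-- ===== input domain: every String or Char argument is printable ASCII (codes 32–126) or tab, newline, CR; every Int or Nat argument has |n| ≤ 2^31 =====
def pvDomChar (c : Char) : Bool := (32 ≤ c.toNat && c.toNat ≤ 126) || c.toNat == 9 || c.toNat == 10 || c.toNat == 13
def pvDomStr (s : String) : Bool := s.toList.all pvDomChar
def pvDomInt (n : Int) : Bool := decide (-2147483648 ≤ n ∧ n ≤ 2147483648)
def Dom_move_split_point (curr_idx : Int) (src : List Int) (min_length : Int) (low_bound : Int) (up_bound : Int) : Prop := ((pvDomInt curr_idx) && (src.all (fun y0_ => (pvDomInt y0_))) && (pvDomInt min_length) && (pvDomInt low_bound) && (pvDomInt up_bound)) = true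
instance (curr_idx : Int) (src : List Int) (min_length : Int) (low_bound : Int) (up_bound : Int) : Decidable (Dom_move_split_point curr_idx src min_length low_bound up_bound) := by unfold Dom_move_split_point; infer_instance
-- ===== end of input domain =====

-- B replaces A's step-by-step while loops with a direct computation of the nearest
-- splittable target (min_length or len(src)-min_length) plus one bound check (simpler).

-- ===== PORT A =====
def is_splittable (curr_idx : Int) (src : List Int) (min_length : Int) : Bool :=
  !(decide (curr_idx < min_length) || decide (curr_idx > (src.length : Int) - min_length))

-- the first while loop of A: increment while not splittable and curr_idx <= up_bound.
-- 'steps' is a totality guard only: it is called with (up_bound + 1 - curr_idx).toNat,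
-- an upper bound on the iterations, so it never cuts the loop short.
def pvLoopUp (src : List Int) (min_length up_bound : Int) (curr_idx : Int) : Nat → Int
  | 0 => curr_idx
  | steps + 1 =>
    if (!is_splittable curr_idx src min_length && decide (curr_idx ≤ up_bound)) then
      pvLoopUp src min_length up_bound (curr_idx + 1) steps
    else
      curr_idx

-- the second while loop of A: decrement while not splittable and curr_idx > low_bound;
-- same totality guard, called with (curr_idx - low_bound).toNat.
def pvLoopDown (src : List Int) (min_length low_bound : Int) (curr_idx : Int) : Nat → Int
  | 0 => curr_idx
  | steps + 1 =>
    if (!is_splittable curr_idx src min_length && decide (curr_idx > low_bound)) then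
      pvLoopDown src min_length low_bound (curr_idx - 1) steps
    else
      curr_idx

def move_split_point (curr_idx : Int) (src : List Int) (min_length : Int) (low_bound : Int) (up_bound : Int) : Int :=
  if low_bound = up_bound then curr_idx
  else
    let backup := curr_idx
    if curr_idx < min_length then
      -- Python asserts curr_idx <= up_bound here (raises otherwise); Pre_ excludes that case
      let j := pvLoopUp src min_length up_bound curr_idx (up_bound + 1 - curr_idx).toNat
      if j ≤ up_bound then j else backup
    else if curr_idx > (src.length : Int) - min_length then
      -- Python asserts curr_idx > low_bound here (raises otherwise); Pre_ excludes that case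
      let j := pvLoopDown src min_length low_bound curr_idx (curr_idx - low_bound).toNat
      if j > low_bound then j else backup
    else backup

-- ===== PORT B =====
def move_split_point_alt (curr_idx : Int) (src : List Int) (min_length : Int) (low_bound : Int) (up_bound : Int) : Int :=
  if low_bound = up_bound then curr_idx
  else
    let n : Int := src.length
    if min_length ≤ curr_idx ∧ curr_idx ≤ n - min_length then curr_idx
    else if curr_idx < min_length then
      if 2 * min_length ≤ n ∧ min_length ≤ up_bound then min_length else curr_idx
    else
      if 2 * min_length ≤ n ∧ n - min_length > low_bound then n - min_length else curr_idx

-- ===== PRECONDITION & SPEC =====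
-- Pre_ excludes exactly the inputs where A's asserts fail (AssertionError): with
-- low_bound ≠ up_bound, curr_idx < min_length requires curr_idx ≤ up_bound, and
-- curr_idx ≥ min_length with curr_idx > len(src)-min_length requires curr_idx > low_bound.
def Pre_move_split_point (curr_idx : Int) (src : List Int) (min_length : Int) (low_bound : Int) (up_bound : Int) : Prop :=
  low_bound = up_bound ∨
    ((curr_idx < min_length → curr_idx ≤ up_bound) ∧
     (min_length ≤ curr_idx → (src.length : Int) - min_length < curr_idx → low_bound < curr_idx))
instance (curr_idx : Int) (src : List Int) (min_length : Int) (low_bound : Int) (up_bound : Int) : Decidable (Pre_move_split_point curr_idx src min_length low_bound up_bound) := by unfold Pre_move_split_point; infer_instance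

def pvWitness_move_split_point : Int × List Int × Int × Int × Int := (2, [1, 2, 3, 4], 1, 0, 3)

-- On inputs where an assert of A fails, A raises AssertionError while B returns curr_idx unchanged.
def Raises_move_split_point (curr_idx : Int) (src : List Int) (min_length : Int) (low_bound : Int) (up_bound : Int) : Prop :=
  low_bound ≠ up_bound ∧
    ((curr_idx < min_length ∧ up_bound < curr_idx) ∨
     (min_length ≤ curr_idx ∧ (src.length : Int) - min_length < curr_idx ∧ curr_idx ≤ low_bound))
instance (curr_idx : Int) (src : List Int) (min_length : Int) (low_bound : Int) (up_bound : Int) : Decidable (Raises_move_split_point curr_idx src min_length low_bound up_bound) := by unfold Raises_move_split_point; infer_instance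

def pvRaiseWitness_move_split_point : Int × List Int × Int × Int × Int := (0, [], 1, 0, -1)
def pvRaiseWitnessOut_move_split_point : Int := 0

def Spec_move_split_point (curr_idx : Int) (src : List Int) (min_length : Int) (low_bound : Int) (up_bound : Int) (out : Int) : Prop := out = move_split_point_alt curr_idx src min_length low_bound up_bound
instance (curr_idx : Int) (src : List Int) (min_length : Int) (low_bound : Int) (up_bound : Int) (out : Int) : Decidable (Spec_move_split_point curr_idx src min_length low_bound up_bound out) := by unfold Spec_move_split_point; infer_instance

-- ===== CLAIM (what is proved, stated in full; the proofs are below) =====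
def Claim_equal_move_split_point : Prop := ∀ (curr_idx : Int) (src : List Int) (min_length : Int) (low_bound : Int) (up_bound : Int), Dom_move_split_point curr_idx src min_length low_bound up_bound → Pre_move_split_point curr_idx src min_length low_bound up_bound → Spec_move_split_point curr_idx src min_length low_bound up_bound (move_split_point curr_idx src min_length low_bound up_bound)

def Claim_raises_move_split_point : Prop := (∀ (curr_idx : Int) (src : List Int) (min_length : Int) (low_bound : Int) (up_bound : Int), Dom_move_split_point curr_idx src min_length low_bound up_bound → Raises_move_split_point curr_idx src min_length low_bound up_bound → ¬ Pre_move_split_point curr_idx src min_length low_bound up_bound) ∧ (Dom_move_split_point (pvRaiseWitness_move_split_point.1) (pvRaiseWitness_move_split_point.2.1) (pvRaiseWitness_move_split_point.2.2.1) (pvRaiseWitness_move_split_point.2.2.2.1) (pvRaiseWitness_move_split_point.2.2.2.2) ∧ Raises_move_split_point (pvRaiseWitness_move_split_point.1) (pvRaiseWitness_move_split_point.2.1) (pvRaiseWitness_move_split_point.2.2.1) (pvRaiseWitness_move_split_point.2.2.2.1) (pvRaiseWitness_move_split_point.2.2.2.2) ∧ move_split_point_alt (pvRaiseWitness_move_split_point.1)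 (pvRaiseWitness_move_split_point.2.1) (pvRaiseWitness_move_split_point.2.2.1) (pvRaiseWitness_move_split_point.2.2.2.1) (pvRaiseWitness_move_split_point.2.2.2.2) = pvRaiseWitnessOut_move_split_point)

-- ===== LEMMAS AND PROOFS =====

-- the upward loop reaches min_length when it is splittable and within the bound
theorem pvLoopUp_reaches (src : List Int) (m u : Int) (h2 : m ≤ (src.length : Int) - m)
    (hmu : m ≤ u) : ∀ (f : Nat) (i : Int), i ≤ m → (m - i).toNat ≤ f →
    pvLoopUp src m u i f = m := by
  intro f
  induction f with
  | zero =>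
    intro i hi hf
    have : i = m := by omega
    simp [pvLoopUp, this]
  | succ k ih =>
    intro i hi hf
    by_cases he : i = m
    · subst he
      simp only [pvLoopUp]
      rw [if_neg (by simp [is_splittable] <;> omega)]
    · simp only [pvLoopUp]
      rw [if_pos (by simp [is_splittable] <;> omega)]
      exact ih (i + 1) (by omega) (by omega)

-- when no splittable position is within reach, the upward loop runs off the bound
theorem pvLoopUp_off (src : List Int) (m u : Int)
    (h : (src.length : Int) - m < m ∨ u < m) :
    ∀ (f : Nat) (i : Int), i ≤ u + 1 → f = (u + 1 - i).toNat →
    pvLoopUp src m u i f = u + 1 := by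
  intro f
  induction f with
  | zero =>
    intro i hi hf
    have : i = u + 1 := by omega
    simp [pvLoopUp, this]
  | succ k ih =>
    intro i hi hf
    have hiu : i ≤ u := by omega
    simp only [pvLoopUp]
    rw [if_pos (by simp [is_splittable] <;> omega)]
    exact ih (i + 1) (by omega) (by omega)

-- the downward loop reaches len(src)-min_length when it is splittable and above the bound
theorem pvLoopDown_reaches (src : List Int) (m l : Int) (h2 : m ≤ (src.length : Int) - m)
    (hl : l < (src.length : Int) - m) :
    ∀ (f : Nat) (i : Int), (src.length : Int) - m ≤ i → (i - ((src.length : Int) - m)).toNat ≤ f →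
    pvLoopDown src m l i f = (src.length : Int) - m := by
  intro f
  induction f with
  | zero =>
    intro i hi hf
    have : i = (src.length : Int) - m := by omega
    simp [pvLoopDown, this]
  | succ k ih =>
    intro i hi hf
    by_cases he : i = (src.length : Int) - m
    · simp only [pvLoopDown]
      rw [if_neg (by simp [is_splittable] <;> omega)]
      exact he
    · simp only [pvLoopDown]
      rw [if_pos (by simp [is_splittable] <;> omega)]
      exact ih (i - 1) (by omega) (by omega)

-- when no splittable position is within reach, the downward loop runs down to the bound
theorem pvLoopDown_off (src : List Int) (m l : Int)
    (h : (src.length : Int) - m < m ∨ (src.length : Int) - m ≤ l) :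
    ∀ (f : Nat) (i : Int), l ≤ i → f = (i - l).toNat →
    pvLoopDown src m l i f = l := by
  intro f
  induction f with
  | zero =>
    intro i hi hf
    have : i = l := by omega
    simp [pvLoopDown, this]
  | succ k ih =>
    intro i hi hf
    have hil : l < i := by omega
    simp only [pvLoopDown]
    rw [if_pos (by simp [is_splittable] <;> omega)]
    exact ih (i - 1) (by omega) (by omega)

-- ===== VERDICT (by name: the statement is the Claim_ definition above) =====
theorem move_split_point_spec : Claim_equal_move_split_point := by
  intro curr src m l u _ hpre
  unfold Spec_move_split_point
  by_cases hlu : l = u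
  · simp [move_split_point, move_split_point_alt, hlu]
  rcases hpre with h | ⟨h1, h2⟩
  · exact absurd h hlu
  by_cases hcm : curr < m
  · have hcu : curr ≤ u := h1 hcm
    by_cases hok : 2 * m ≤ (src.length : Int) ∧ m ≤ u
    · have hj : pvLoopUp src m u curr (u + 1 - curr).toNat = m :=
        pvLoopUp_reaches src m u (by omega) hok.2 _ curr (by omega) (by omega)
      simp only [move_split_point, move_split_point_alt, if_neg hlu, hj]
      split_ifs <;> omega
    · have hj : pvLoopUp src m u curr (u + 1 - curr).toNat = u + 1 :=
        pvLoopUp_off src m u (by omega) _ curr (by omega) rfl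
      simp only [move_split_point, move_split_point_alt, if_neg hlu, hj]
      split_ifs <;> omega
  · by_cases hcn : (src.length : Int) - m < curr
    · have hcl : l < curr := h2 (by omega) hcn
      by_cases hok : 2 * m ≤ (src.length : Int) ∧ l < (src.length : Int) - m
      · have hj : pvLoopDown src m l curr (curr - l).toNat = (src.length : Int) - m :=
          pvLoopDown_reaches src m l (by omega) hok.2 _ curr (by omega) (by omega)
        simp only [move_split_point, move_split_point_alt, if_neg hlu, hj]
        split_ifs <;> omega
      · have hj : pvLoopDown src m l curr (curr - l).toNat = l :=
          pvLoopDown_off src m l (by omega) _ curr (by omega) rfl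
        simp only [move_split_point, move_split_point_alt, if_neg hlu, hj]
        split_ifs <;> omega
    · simp only [move_split_point, move_split_point_alt, if_neg hlu]
      split_ifs <;> omega

def move_split_point_raises : Claim_raises_move_split_point := by
  unfold Claim_raises_move_split_point
  constructor
  · intro curr src m l u _ hr hp
    unfold Raises_move_split_point at hr
    unfold Pre_move_split_point at hp
    rcases hp with h | ⟨h1, h2⟩
    · exact hr.1 h
    · rcases hr.2 with ⟨a, b⟩ | ⟨a, b, c⟩
      · have := h1 a; omega
      · have := h2 a b; omega
  · exact ⟨by decide, by decide, by decide⟩
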